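-- pv_equiv track=rewrite | github.com/apache/systemds | scripts/perftest/python/google_docs/stats.py | get_formatted_data
-- ===== SOURCE A (Python) =====
-- def get_formatted_data(sheet_data):
--     """
--     Read all the data from google sheets and transforms it into a dictionary that can be
--     use for plotting later
--     """
--     algo_dict = {}
--
--     for i in sheet_data:
--         inn_count = 0
--         data = []
--         for key, val in i.items():
--             inn_count += 1
--             if inn_count < 3:
--                 data.append(key)
--                 data.append(val)
--
--             if inn_count == 2:
--                 t1, v1, _, v2 = data
--                 if len(str(v2)) > 0:
--                     if v1 not in algo_dict:
--                         algo_dict[v1] = [{t1: v2}]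
--                     else:
--                         algo_dict[v1].append({t1: v2})
--                     inn_count = 0
--                     data = []
--     return algo_dict
-- ===== SOURCE B (Python) =====
-- def get_formatted_data(sheet_data):
--     """
--     Read all the data from google sheets and transforms it into a dictionary that can be
--     use for plotting later
--     """
--     algo_dict = {}
--     for i in sheet_data:
--         items = list(i.items())
--         for j in range(0, len(items) - 1, 2):
--             t1, v1 = items[j]
--             _, v2 = items[j + 1]
--             if len(str(v2)) > 0:
--                 algo_dict.setdefault(v1, []).append({t1: v2})
--             else:
--                 break
--     return algo_dict
-- ===== Notes on version B (the rewrite author's own statement) =====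
-- stated objective: simpler
-- what changed: Replaces A's counter/reset state machine (inn_count, data accumulator, in-check + append) over each row's items with a direct pairwise traversal (step-2 index loop unpacking two items at a time, setdefault-append, break on empty value).
import Mathlib
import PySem

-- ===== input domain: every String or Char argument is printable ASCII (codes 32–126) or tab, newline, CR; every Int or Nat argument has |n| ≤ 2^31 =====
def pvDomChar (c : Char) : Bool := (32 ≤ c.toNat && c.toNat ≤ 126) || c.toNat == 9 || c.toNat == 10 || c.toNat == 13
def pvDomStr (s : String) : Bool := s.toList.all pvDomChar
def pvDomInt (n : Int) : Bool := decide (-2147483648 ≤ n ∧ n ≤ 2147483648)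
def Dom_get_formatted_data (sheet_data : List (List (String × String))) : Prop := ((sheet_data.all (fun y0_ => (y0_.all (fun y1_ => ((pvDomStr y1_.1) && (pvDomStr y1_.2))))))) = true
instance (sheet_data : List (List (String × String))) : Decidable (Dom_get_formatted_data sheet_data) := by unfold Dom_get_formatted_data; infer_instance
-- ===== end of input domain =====

-- B replaces A's counter/reset state machine over dict items by a direct pairwise traversal of the
-- item list with an early break (objective: simpler); same return value on every admitted input.

-- ===== PORT A =====
-- inner 'for key, val in i.items()' loop of A, with its state (inn_count, data, algo_dict)
def pvA_row : List (String × String) → Nat → List String →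
    PySem.Dict String (List (List (String × String))) → PySem.Dict String (List (List (String × String)))
  | [], _, _, d => d
  | (key, val) :: rest, inn_count, data, d =>
    let inn_count := inn_count + 1
    let data := if inn_count < 3 then data ++ [key, val] else data
    if inn_count == 2 then
      match data with
      | [t1, v1, _, v2] =>
        if PySem.Str.len v2 > 0 then
          pvA_row rest 0 []
            (if d.contains v1 then d.modify v1 [] (· ++ [[(t1, v2)]]) else d.insert v1 [[(t1, v2)]])
        else pvA_row rest inn_count data d
      | other => pvA_row rest inn_count other d   -- unreachable: when inn_count = 2, data has 4 entries
    else pvA_row rest inn_count data d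

def get_formatted_data (sheet_data : List (List (String × String))) : List (String × List (List (String × String))) :=
  (sheet_data.foldl (fun algo_dict i => pvA_row i 0 [] algo_dict) PySem.Dict.empty).items

-- ===== PORT B =====
-- B's index-stepped pairwise loop 'for j in range(0, len(items)-1, 2)' with break, as recursion two items at a time
def pvB_row : List (String × String) →
    PySem.Dict String (List (List (String × String))) → PySem.Dict String (List (List (String × String)))
  | (t1, v1) :: (_, v2) :: rest, d =>
    if PySem.Str.len v2 > 0 then
      pvB_row rest ((d.setdefault v1 []).modify v1 [] (· ++ [[(t1, v2)]]))
    else d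
  | _, d => d

def get_formatted_data_alt (sheet_data : List (List (String × String))) : List (String × List (List (String × String))) :=
  (sheet_data.foldl (fun algo_dict i => pvB_row i algo_dict) PySem.Dict.empty).items

-- ===== PRECONDITION & SPEC =====
def Spec_get_formatted_data (sheet_data : List (List (String × String))) (out : List (String × List (List (String × String)))) : Prop := out = get_formatted_data_alt sheet_data
instance (sheet_data : List (List (String × String))) (out : List (String × List (List (String × String)))) : Decidable (Spec_get_formatted_data sheet_data out) := by unfold Spec_get_formatted_data; infer_instance

-- ===== CLAIM (what is proved, stated in full; the proofs are below) =====
def Claim_equal_get_formatted_data : Prop := ∀ (sheet_data : List (List (String × String))), Dom_get_formatted_data sheet_data → Spec_get_formatted_data sheet_data (get_formatted_data sheet_data)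

-- ===== LEMMAS AND PROOFS =====

-- once inn_count ≥ 2 without a reset, A's inner loop never touches the dict again
theorem pvA_row_dead (l : List (String × String)) :
    ∀ (c : Nat) (data : List String) (d : PySem.Dict String (List (List (String × String)))),
    2 ≤ c → pvA_row l c data d = d := by
  induction l with
  | nil => intro c data d _; rfl
  | cons p rest ih =>
    intro c data d hc
    obtain ⟨key, val⟩ := p
    simp only [pvA_row]
    have h3 : ¬ (c + 1 < 3) := by omega
    have h2 : (c + 1 == 2) = false := by simp; omega
    simp only [if_neg h3, h2, Bool.false_eq_true, if_false]
    exact ih _ _ _ (by omega)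

-- dictionaries with equal item lists are equal
theorem pvDict_ext {ν : Type} (a b : PySem.Dict String ν) (h : a.items = b.items) : a = b := by
  cases a; cases b; cases h; rfl

-- overwriting a freshly inserted key
theorem pvInsert_insert {ν : Type} (d : PySem.Dict String ν) (k : String) (v w : ν)
    (h : d.contains k = false) : (d.insert k v).insert k w = d.insert k w := by
  apply pvDict_ext
  rw [PySem.Dict.items_insert_of_contains _ _ (PySem.Dict.contains_insert_self d k v),
      PySem.Dict.items_insert_of_not_contains _ _ h,
      PySem.Dict.items_insert_of_not_contains _ _ h, List.map_append]
  congr 1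
  · have hfn : ∀ p ∈ d.items, (if (p.1 == k) = true then (k, w) else p) = id p := by
      intro p hp
      have hne : (p.1 == k) = false := by
        by_contra hc
        have hpk : p.1 = k := by simpa using hc
        exact absurd ((PySem.Dict.contains_iff_mem_keys (d := d) (k := k)).mpr (hpk ▸ PySem.Dict.mem_keys_of_mem_items d hp)) (by simp [h])
      simp [hne]
    rw [List.map_congr_left hfn, List.map_id]
  · simp

-- A's in-check update equals B's setdefault-append update
theorem pvUpdate_eq (d : PySem.Dict String (List (List (String × String)))) (t1 v1 v2 : String) :
    (if d.contains v1 then d.modify v1 [] (· ++ [[(t1, v2)]]) else d.insert v1 [[(t1, v2)]])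
      = (d.setdefault v1 []).modify v1 [] (· ++ [[(t1, v2)]]) := by
  by_cases h : d.contains v1
  · simp [PySem.Dict.setdefault, h]
  · simp only [h, Bool.false_eq_true, if_false]
    have hsd : d.setdefault v1 [] = d.insert v1 [] := by
      apply pvDict_ext
      simp [PySem.Dict.setdefault, h, PySem.Dict.items_insert_of_not_contains _ _ (by simpa using h)]
    rw [hsd]
    have hmod : (d.insert v1 []).modify v1 [] (· ++ [[(t1, v2)]])
        = (d.insert v1 []).insert v1 ([] ++ [[(t1, v2)]]) := by
      apply pvDict_ext
      simp [PySem.Dict.modify, PySem.Dict.getD_insert_self]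
    rw [hmod, List.nil_append, pvInsert_insert _ _ _ _ (by simpa using h)]

-- the two row processors agree from A's initial state (inn_count = 0, data = [])
theorem pvRow_eq (l : List (String × String)) (d : PySem.Dict String (List (List (String × String)))) :
    pvA_row l 0 [] d = pvB_row l d := by
  fun_induction pvB_row l d with
  | case1 t1 v1 k2 v2 rest d hv ih =>
    simp only [pvA_row]
    norm_num
    rw [if_pos (by simpa using hv), pvUpdate_eq, ih]
  | case2 t1 v1 k2 v2 rest d hv =>
    simp only [pvA_row]
    norm_num
    rw [if_neg (by simpa using hv), pvA_row_dead _ _ _ _ (by omega)]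
  | case3 l d h =>
    match l with
    | [] => rfl
    | [(k, v)] => simp [pvA_row]
    | (a :: b :: rest) => exact absurd rfl (h a.1 a.2 b.1 b.2 rest)

-- ===== VERDICT (by name: the statement is the Claim_ definition above) =====
theorem get_formatted_data_spec : Claim_equal_get_formatted_data := by
  intro sheet_data _
  unfold Spec_get_formatted_data get_formatted_data get_formatted_data_alt
  simp only [pvRow_eq]
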